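-- pv_equiv track=rewrite | github.com/JohnDorsey/RelentlessFractals | RelentlessFractals.py | gen_ljusted
-- ===== SOURCE A (Python) =====
-- import itertools
--
-- def gen_ljusted(input_seq, length, default=None, crop=False):
--     yieldCount = 0
--     itemGen = itertools.islice(input_seq, 0, length) if crop else iter(input_seq)
--     for item in itemGen:
--         yield item
--         yieldCount += 1
--     while yieldCount < length:
--         yield default
--         yieldCount += 1
-- ===== SOURCE B (Python) =====
-- import itertools
--
-- def gen_ljusted(input_seq, length, default=None, crop=False):
--     items = list(itertools.islice(input_seq, length)) if crop else list(input_seq)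
--     if len(items) < length:
--         items = items + [default] * (length - len(items))
--     yield from items
-- ===== Notes on version B (the rewrite author's own statement) =====
-- stated objective: simpler
-- what changed: B materializes the (optionally islice-cropped) source into a list once and appends the shortfall as a single bulk [default]*(length-len(items)) pad computed from len, replacing A's streaming loop with a running yield counter followed by a counting while-pad loop.
-- outside the precondition, e.g. on gen_ljusted([1], 2, None, False): A returns [1, None], B returns [1, None]; on gen_ljusted([1, 2], -1, None, True): A raises ValueError, B raises ValueError
import Mathlib
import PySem

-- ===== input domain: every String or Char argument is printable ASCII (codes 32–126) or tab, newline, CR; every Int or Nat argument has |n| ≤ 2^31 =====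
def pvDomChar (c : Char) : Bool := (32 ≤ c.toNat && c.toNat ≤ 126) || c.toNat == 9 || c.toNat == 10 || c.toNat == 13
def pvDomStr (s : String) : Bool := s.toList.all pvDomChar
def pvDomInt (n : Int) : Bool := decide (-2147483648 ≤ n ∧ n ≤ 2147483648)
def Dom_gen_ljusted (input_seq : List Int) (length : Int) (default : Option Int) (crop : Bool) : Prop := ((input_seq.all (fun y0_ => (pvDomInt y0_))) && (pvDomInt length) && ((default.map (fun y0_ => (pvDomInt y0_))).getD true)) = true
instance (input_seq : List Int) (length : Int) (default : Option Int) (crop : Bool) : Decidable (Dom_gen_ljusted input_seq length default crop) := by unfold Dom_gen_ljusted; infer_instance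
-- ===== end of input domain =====

-- ===== PORT A =====
-- A is a generator; its yielded sequence is the returned List Int.  The pad
-- value `default` is an Option Int; under Pre_ padding only happens when it is
-- `some d`, and both ports read it as `default.getD 0` (the 0 is never used
-- inside Pre_).
-- A's trailing `while yieldCount < length: yield default` loop:
def gen_ljustedPad (yieldCount length : Int) (d : Int) : List Int :=
  if yieldCount < length then d :: gen_ljustedPad (yieldCount + 1) length d else []
termination_by (length - yieldCount).toNat
decreasing_by omega

def gen_ljusted (input_seq : List Int) (length : Int) (default : Option Int) (crop : Bool) : List Int :=
  -- itemGen = islice(input_seq, 0, length) if crop else iter(input_seq); Pre_ gives 0 ≤ length when crop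
  let itemGen := if crop then input_seq.take length.toNat else input_seq
  -- the for-loop yields every item and counts them, then the while-loop pads
  itemGen ++ gen_ljustedPad itemGen.length length (default.getD 0)

-- ===== PORT B =====
def gen_ljusted_alt (input_seq : List Int) (length : Int) (default : Option Int) (crop : Bool) : List Int :=
  let items := if crop then input_seq.take length.toNat else input_seq
  if (items.length : Int) < length then
    items ++ List.replicate (length - items.length).toNat (default.getD 0)
  else
    items

-- ===== PRECONDITION & SPEC =====
-- Pre_ excludes (i) crop = true with length < 0, where A raises ValueError (islice),
-- and (ii) inputs needing padding with default = None, where A yields None, which is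
-- not a value of the declared element type Int.
def Pre_gen_ljusted (input_seq : List Int) (length : Int) (default : Option Int) (crop : Bool) : Prop :=
  (crop = true → 0 ≤ length) ∧ ((input_seq.length : Int) < length → default ≠ none)
instance (input_seq : List Int) (length : Int) (default : Option Int) (crop : Bool) : Decidable (Pre_gen_ljusted input_seq length default crop) := by unfold Pre_gen_ljusted; infer_instance

def pvWitness_gen_ljusted : List Int × Int × Option Int × Bool := ([3, 1, 2], 5, some 7, false)

def Spec_gen_ljusted (input_seq : List Int) (length : Int) (default : Option Int) (crop : Bool) (out : List Int) : Prop := out = gen_ljusted_alt input_seq length default crop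
instance (input_seq : List Int) (length : Int) (default : Option Int) (crop : Bool) (out : List Int) : Decidable (Spec_gen_ljusted input_seq length default crop out) := by unfold Spec_gen_ljusted; infer_instance

-- ===== CLAIM (what is proved, stated in full; the proofs are below) =====
def Claim_equal_gen_ljusted : Prop := ∀ (input_seq : List Int) (length : Int) (default : Option Int) (crop : Bool), Dom_gen_ljusted input_seq length default crop → Pre_gen_ljusted input_seq length default crop → Spec_gen_ljusted input_seq length default crop (gen_ljusted input_seq length default crop)

-- ===== LEMMAS AND PROOFS =====
theorem gen_ljustedPad_eq_replicate : ∀ (n : Nat) (cnt length d : Int), (length - cnt).toNat = n →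
    gen_ljustedPad cnt length d = List.replicate n d := by
  intro n
  induction n with
  | zero =>
    intro cnt length d h
    rw [gen_ljustedPad]
    have hn : ¬ cnt < length := by omega
    simp [hn]
  | succ k ih =>
    intro cnt length d h
    rw [gen_ljustedPad]
    have hc : cnt < length := by omega
    simp only [hc, if_true, List.replicate_succ]
    exact congrArg _ (ih (cnt + 1) length d (by omega))

-- ===== VERDICT (by name: the statement is the Claim_ definition above) =====
theorem gen_ljusted_spec : Claim_equal_gen_ljusted := by
  intro input_seq length default crop _ _
  unfold Spec_gen_ljusted gen_ljusted gen_ljusted_alt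
  dsimp only
  set items := if crop then input_seq.take length.toNat else input_seq with hitems
  rw [gen_ljustedPad_eq_replicate (length - (items.length : Int)).toNat items.length length (default.getD 0) rfl]
  by_cases h : (items.length : Int) < length
  · simp [h]
  · have : (length - (items.length : Int)).toNat = 0 := by omega
    simp [h, this]
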